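-- pv_equiv track=rewrite | github.com/Chen-XiaoLei/Hooglle | logparser/parser/prefix_tree.py | Contain_others
-- ===== SOURCE A (Python) =====
-- def Contain_others(log,wilds):
--     containDigit = False
--     containAlpha = False
--     if ('digit' in wilds):
--         containDigit = True
--     if ('alpha' in wilds):
--         containAlpha = True
--     for ch_now in log:
--         if (ch_now.isdigit() and not containDigit):
--             return True
--         if (ch_now.isalpha() and not containAlpha):
--             return True
--         if (not ch_now.isalnum() and ch_now not in wilds):
--             return True
--     return False
-- ===== SOURCE B (Python) =====
-- def Contain_others(log, wilds):
--     containDigit = 'digit' in wilds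
--     containAlpha = 'alpha' in wilds
--     if not containDigit and any(c.isdigit() for c in log):
--         return True
--     if not containAlpha and any(c.isalpha() for c in log):
--         return True
--     return any((not c.isalnum()) and c not in wilds for c in log)
-- ===== Notes on version B (the rewrite author's own statement) =====
-- stated objective: simpler
-- what changed: Replaced A's single fused loop with three-way branching per character by three separate existence checks (any-passes), one per disjunct; the result is a boolean OR of existence checks so scan order is irrelevant.
import Mathlib
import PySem

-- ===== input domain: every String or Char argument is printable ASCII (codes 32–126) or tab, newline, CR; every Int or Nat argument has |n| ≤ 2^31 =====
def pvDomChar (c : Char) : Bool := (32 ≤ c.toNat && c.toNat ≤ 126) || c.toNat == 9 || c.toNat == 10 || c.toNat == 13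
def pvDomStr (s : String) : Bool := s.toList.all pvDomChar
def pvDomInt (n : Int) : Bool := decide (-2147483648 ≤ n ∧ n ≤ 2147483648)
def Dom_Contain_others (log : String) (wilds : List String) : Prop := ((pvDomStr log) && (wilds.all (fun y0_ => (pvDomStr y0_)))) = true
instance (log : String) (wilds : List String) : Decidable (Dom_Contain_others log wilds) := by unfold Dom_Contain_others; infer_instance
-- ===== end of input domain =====

-- B replaces A's single fused per-character loop by three separate existence checks, one per disjunct (simpler decomposition; same result, order irrelevant for a disjunction of existence checks).


-- ===== PORT A =====
def containOthersLoop (wilds : List String) (containDigit containAlpha : Bool) : List Char → Bool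
  | [] => false
  | c :: rest =>
    if PySem.Chars.isdigit c && !containDigit then true
    else if PySem.Chars.isalpha c && !containAlpha then true
    else if !PySem.Chars.isalnum c && !(wilds.contains (String.ofList [c])) then true
    else containOthersLoop wilds containDigit containAlpha rest

def Contain_others (log : String) (wilds : List String) : Bool :=
  let containDigit := wilds.contains "digit"
  let containAlpha := wilds.contains "alpha"
  containOthersLoop wilds containDigit containAlpha log.toList

-- ===== PORT B =====
def Contain_others_alt (log : String) (wilds : List String) : Bool :=
  let containDigit := wilds.contains "digit"
  let containAlpha := wilds.contains "alpha"
  if !containDigit && log.toList.any (fun c => PySem.Chars.isdigit c) then true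
  else if !containAlpha && log.toList.any (fun c => PySem.Chars.isalpha c) then true
  else log.toList.any (fun c => !PySem.Chars.isalnum c && !(wilds.contains (String.ofList [c])))

-- ===== PRECONDITION & SPEC =====
def Spec_Contain_others (log : String) (wilds : List String) (out : Bool) : Prop := out = Contain_others_alt log wilds
instance (log : String) (wilds : List String) (out : Bool) : Decidable (Spec_Contain_others log wilds out) := by unfold Spec_Contain_others; infer_instance

-- ===== CLAIM (what is proved, stated in full; the proofs are below) =====
def Claim_equal_Contain_others : Prop := ∀ (log : String) (wilds : List String), Dom_Contain_others log wilds → Spec_Contain_others log wilds (Contain_others log wilds)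

-- ===== LEMMAS AND PROOFS =====
theorem containOthersLoop_eq_any (wilds : List String) (d a : Bool) (cs : List Char) :
    containOthersLoop wilds d a cs =
      ((!d && cs.any (fun c => PySem.Chars.isdigit c)) ||
       (!a && cs.any (fun c => PySem.Chars.isalpha c)) ||
       cs.any (fun c => !PySem.Chars.isalnum c && !(wilds.contains (String.ofList [c])))) := by
  induction cs with
  | nil => simp [containOthersLoop]
  | cons c rest ih =>
    simp only [containOthersLoop, List.any_cons]
    split_ifs with h1 h2 h3
    · simp at h1; simp [h1.1, h1.2]
    · simp at h2; simp [h2.1, h2.2]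
    · simp at h3; simp [h3.1, h3.2]
    · simp only [Bool.and_eq_true, Bool.not_eq_true', not_and] at h1 h2 h3
      rw [ih]
      cases hd : PySem.Chars.isdigit c <;> cases ha : PySem.Chars.isalpha c <;>
        cases hn : PySem.Chars.isalnum c <;> cases hw : wilds.contains (String.ofList [c]) <;>
        simp_all

-- ===== VERDICT (by name: the statement is the Claim_ definition above) =====
theorem Contain_others_spec : Claim_equal_Contain_others := by
  intro log wilds _
  unfold Spec_Contain_others Contain_others Contain_others_alt
  rw [containOthersLoop_eq_any]
  by_cases h1 : (!wilds.contains "digit" && log.toList.any fun c => PySem.Chars.isdigit c) = true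
  · rw [if_pos h1, h1]; simp
  · rw [if_neg h1]
    simp only [Bool.not_eq_true] at h1
    rw [h1]
    by_cases h2 : (!wilds.contains "alpha" && log.toList.any fun c => PySem.Chars.isalpha c) = true
    · rw [if_pos h2, h2]; simp
    · rw [if_neg h2]
      simp only [Bool.not_eq_true] at h2
      rw [h2]
      simp
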